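-- pv_equiv track=rewrite | github.com/rachelvfernandes/othello | othello.py | edge_build
-- ===== SOURCE A (Python) =====
-- E = 2 #empty
--
-- def edge_build(edge, player):
--     num_other_player_in_between = 0
--     for space in edge:
--         if space == E:
--             return num_other_player_in_between
--         elif space == player:
--             num_other_player_in_between += 1
--     return num_other_player_in_between
-- ===== SOURCE B (Python) =====
-- E = 2 #empty
--
-- def edge_build(edge, player):
--     idx = edge.index(E) if E in edge else len(edge)
--     return edge[:idx].count(player)
-- ===== Notes on version B (the rewrite author's own statement) =====
-- stated objective: simpler
-- what changed: Replaces the fused single-pass loop (manual counter with an early return on the first empty cell) by a two-step decomposition: locate the first empty cell with index, then count the player's pieces in that prefix with slice+count.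
import Mathlib
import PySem

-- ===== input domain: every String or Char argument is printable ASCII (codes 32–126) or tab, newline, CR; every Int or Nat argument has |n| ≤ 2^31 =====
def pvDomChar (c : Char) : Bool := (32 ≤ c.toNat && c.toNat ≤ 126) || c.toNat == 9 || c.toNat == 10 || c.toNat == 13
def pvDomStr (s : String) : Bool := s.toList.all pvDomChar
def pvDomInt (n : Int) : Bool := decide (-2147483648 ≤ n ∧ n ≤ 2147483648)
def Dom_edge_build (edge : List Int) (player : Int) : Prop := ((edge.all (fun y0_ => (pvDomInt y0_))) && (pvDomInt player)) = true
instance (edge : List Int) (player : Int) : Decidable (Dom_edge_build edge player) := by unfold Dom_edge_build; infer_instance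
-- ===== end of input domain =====

-- B is a simpler decomposition of A: find the first empty cell, then count the player's
-- pieces in that prefix, instead of a fused loop with a manual counter and early return.

-- ===== PORT A =====
-- loop over the edge, carrying num_other_player_in_between; early return on the first empty space
def edgeBuildLoop (edge : List Int) (player : Int) (acc : Int) : Int :=
  match edge with
  | [] => acc
  | space :: rest =>
    if space = 2 then acc
    else if space = player then edgeBuildLoop rest player (acc + 1)
    else edgeBuildLoop rest player acc

def edge_build (edge : List Int) (player : Int) : Int :=
  edgeBuildLoop edge player 0

-- ===== PORT B =====
def edge_build_alt (edge : List Int) (player : Int) : Int :=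
  let idx : Int :=
    match PySem.List.index? edge 2 with
    | some i => (i : Int)
    | none => (edge.length : Int)
  ((PySem.List.count (PySem.List.slice edge none (some idx)) player : Nat) : Int)

-- ===== PRECONDITION & SPEC =====
def Spec_edge_build (edge : List Int) (player : Int) (out : Int) : Prop := out = edge_build_alt edge player
instance (edge : List Int) (player : Int) (out : Int) : Decidable (Spec_edge_build edge player out) := by unfold Spec_edge_build; infer_instance

-- ===== CLAIM (what is proved, stated in full; the proofs are below) =====
def Claim_equal_edge_build : Prop := ∀ (edge : List Int) (player : Int), Dom_edge_build edge player → Spec_edge_build edge player (edge_build edge player)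

-- ===== LEMMAS AND PROOFS =====

-- the slice up to the first 2 (or the whole list) is the takeWhile-prefix before the first 2
theorem slice_idx_eq_takeWhile (edge : List Int) :
    PySem.List.slice edge none (some (match PySem.List.index? edge 2 with
      | some i => ((i : Nat) : Int)
      | none => ((edge.length : Nat) : Int))) = edge.takeWhile (fun x => x ≠ 2) := by
  induction edge with
  | nil => simp [PySem.List.slice]
  | cons x xs ih =>
    by_cases hx : x = 2
    · subst hx
      rw [PySem.List.index?_cons_self]
      simp [PySem.List.slice, PySem.List.clampIdx]
    · simp only [PySem.List.index?_cons_of_ne xs hx]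
      cases h : PySem.List.index? xs 2 with
      | some i =>
        rw [h] at ih
        simp only [Option.map_some]
        rw [PySem.List.slice_to_natCast] at ih ⊢
        simp [List.take_succ_cons, hx, ih]
      | none =>
        rw [h] at ih
        simp only [Option.map_none]
        rw [PySem.List.slice_to_natCast] at ih ⊢
        simp only [List.length_cons, List.take_succ_cons, List.take_length] at *
        simp [hx]
        simpa using ih

-- B computes the player-count of the prefix before the first 2
theorem edge_build_alt_eq_takeWhile (edge : List Int) (player : Int) :
    edge_build_alt edge player = ((edge.takeWhile (fun x => x ≠ 2)).count player : Int) := by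
  have := slice_idx_eq_takeWhile edge
  simp only [edge_build_alt, PySem.List.count_eq]
  cases h : PySem.List.index? edge 2 with
  | some i => rw [h] at this; rw [this]
  | none => rw [h] at this; rw [this]

-- A's loop adds the prefix count to its accumulator
theorem edgeBuildLoop_eq (edge : List Int) (player : Int) (acc : Int) :
    edgeBuildLoop edge player acc = acc + ((edge.takeWhile (fun x => x ≠ 2)).count player : Int) := by
  induction edge generalizing acc with
  | nil => simp [edgeBuildLoop]
  | cons x xs ih =>
    by_cases hx : x = 2
    · subst hx; simp [edgeBuildLoop, List.takeWhile]
    · rw [show edgeBuildLoop (x :: xs) player acc =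
            if x = 2 then acc else if x = player then edgeBuildLoop xs player (acc + 1)
            else edgeBuildLoop xs player acc from rfl]
      rw [if_neg hx, List.takeWhile_cons_of_pos (by simp [hx])]
      by_cases hp : x = player
      · rw [if_pos hp, ih]
        simp [hp]
        ring
      · rw [if_neg hp, ih]
        simp [List.count_cons]
        exact hp

-- ===== VERDICT (by name: the statement is the Claim_ definition above) =====
theorem edge_build_spec : Claim_equal_edge_build := by
  intro edge player _
  unfold Spec_edge_build edge_build
  rw [edgeBuildLoop_eq, edge_build_alt_eq_takeWhile]
  ring
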